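-- pv_equiv track=rewrite | github.com/bbocwang/LeetCode | gs_oa_prepare/PressACapLock.py | process
-- ===== SOURCE A (Python) =====
-- def process(input):
--     pressed = False
--     result =  []
--     for i in input:
--         if i == 'a' or i == 'A':
--             pressed = not pressed
--             continue
--         else:
--             if pressed:
--                 result.append(i.upper())
--             else:
--                 result.append(i)
--     return ''.join(str(x) for x in result)
-- ===== SOURCE B (Python) =====
-- def process(input):
--     parts = input.replace('A', 'a').split('a')
--     return ''.join(p.upper() if i % 2 == 1 else p for i, p in enumerate(parts))
-- ===== Notes on version B (the rewrite author's own statement) =====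
-- stated objective: faster
-- what changed: Replaces the per-character toggle state machine with a split on the toggle characters ('A' normalised to 'a', then str.split) followed by uppercasing the odd-indexed segments and joining.
import Mathlib
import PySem

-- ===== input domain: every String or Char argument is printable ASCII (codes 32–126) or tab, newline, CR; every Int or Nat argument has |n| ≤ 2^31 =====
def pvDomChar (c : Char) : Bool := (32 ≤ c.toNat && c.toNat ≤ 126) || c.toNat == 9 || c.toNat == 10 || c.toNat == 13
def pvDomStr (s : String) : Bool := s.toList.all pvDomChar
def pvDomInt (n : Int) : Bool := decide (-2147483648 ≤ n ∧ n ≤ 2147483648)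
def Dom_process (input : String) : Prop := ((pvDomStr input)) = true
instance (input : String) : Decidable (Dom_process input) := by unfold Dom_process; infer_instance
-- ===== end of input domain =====

-- B replaces A's per-character caps-toggle state machine by splitting the string on the
-- toggle characters and uppercasing the odd-indexed segments (objective: faster, measured).

-- ===== PORT A =====
def processStep (st : Bool × List Char) (i : Char) : Bool × List Char :=
  if i == 'a' || i == 'A' then (!st.1, st.2)
  else if st.1 then (st.1, st.2 ++ [PySem.Chars.upperChar i])
  else (st.1, st.2 ++ [i])

def process (input : String) : String :=
  String.ofList (input.toList.foldl processStep (false, [])).2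

-- ===== PORT B =====
def process_alt (input : String) : String :=
  String.ofList (PySem.Chars.join []
    ((PySem.List.enumerate
        (PySem.Chars.splitOn (PySem.Chars.replace input.toList ['A'] ['a']) ['a'])).map
      (fun ip => if ip.1 % 2 = 1 then PySem.Chars.upper ip.2 else ip.2)))

-- ===== PRECONDITION & SPEC =====
def Spec_process (input : String) (out : String) : Prop := out = process_alt input
instance (input : String) (out : String) : Decidable (Spec_process input out) := by unfold Spec_process; infer_instance

-- ===== CLAIM (what is proved, stated in full; the proofs are below) =====
def Claim_equal_process : Prop := ∀ (input : String), Dom_process input → Spec_process input (process input)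

-- ===== LEMMAS AND PROOFS =====

-- A's loop, as a structural recursion (no accumulator)
def fA : List Char → Bool → List Char
  | [], _ => []
  | c :: cs, p =>
    if c = 'a' ∨ c = 'A' then fA cs (!p)
    else (if p then PySem.Chars.upperChar c else c) :: fA cs p

-- segments of a char list between occurrences of 'a'/'A'
def splitAA : List Char → List (List Char)
  | [] => [[]]
  | c :: cs => if c = 'a' ∨ c = 'A' then [] :: splitAA cs else (splitAA cs).modifyHead (c :: ·)

-- segments of a char list between occurrences of 'a' only
def splitA : List Char → List (List Char)
  | [] => [[]]
  | c :: cs => if c = 'a' then [] :: splitA cs else (splitA cs).modifyHead (c :: ·)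

-- join with alternating uppercasing, starting in state p
def altJoin : Bool → List (List Char) → List Char
  | _, [] => []
  | p, s :: rest => (if p then PySem.Chars.upper s else s) ++ altJoin (!p) rest

def normA (c : Char) : Char := if c = 'A' then 'a' else c

theorem modifyHead_ext (f g : List Char → List Char) (h : ∀ x, f x = g x)
    (xs : List (List Char)) : xs.modifyHead f = xs.modifyHead g := by
  cases xs <;> simp [List.modifyHead, h]

theorem modifyHead_id' (f : List Char → List Char) (h : ∀ x, f x = x)
    (xs : List (List Char)) : xs.modifyHead f = xs := by
  cases xs <;> simp [List.modifyHead, h]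

theorem joinNil_cons (x : List Char) (xs : List (List Char)) :
    PySem.Chars.join [] (x :: xs) = x ++ PySem.Chars.join [] xs := by
  cases xs <;> simp [PySem.Chars.join, List.intercalate, List.intersperse]

theorem foldl_fA (cs : List Char) (p : Bool) (acc : List Char) :
    (cs.foldl processStep (p, acc)).2 = acc ++ fA cs p := by
  induction cs generalizing p acc with
  | nil => simp [fA]
  | cons c cs ih =>
    by_cases h : c = 'a' ∨ c = 'A'
    · have hstep : processStep (p, acc) c = (!p, acc) := by simp [processStep, h]
      rw [List.foldl_cons, hstep, ih]
      simp [fA, h]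
    · by_cases hp : p = true
      · have hstep : processStep (p, acc) c = (p, acc ++ [PySem.Chars.upperChar c]) := by
          simp [processStep, h, hp]
        rw [List.foldl_cons, hstep, ih]
        simp [fA, h, hp]
      · have hstep : processStep (p, acc) c = (p, acc ++ [c]) := by
          simp [processStep, h, hp]
        rw [List.foldl_cons, hstep, ih]
        simp [fA, h, hp]

theorem replace_go_norm (fuel : Nat) (l acc : List Char) (h : l.length ≤ fuel) :
    PySem.Chars.replace.go ['A'] ['a'] fuel l acc = acc.reverse ++ l.map normA := by
  induction fuel generalizing l acc with
  | zero =>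
    have : l = [] := List.length_eq_zero_iff.mp (Nat.le_zero.mp h)
    subst this; simp [PySem.Chars.replace.go]
  | succ n ih =>
    cases l with
    | nil => simp [PySem.Chars.replace.go]
    | cons c t =>
      simp only [PySem.Chars.replace.go]
      by_cases hc : c = 'A'
      · subst hc
        have hpre : List.isPrefixOf ['A'] ('A' :: t) = true := by simp [List.isPrefixOf]
        simp only [hpre, if_true]
        rw [show List.drop (List.length ['A']) ('A' :: t) = t from rfl]
        rw [ih t _ (by simpa using h)]
        simp [normA]
      · have hpre : List.isPrefixOf ['A'] (c :: t) = false := by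
          simp [List.isPrefixOf]
          exact fun hx => hc hx.symm
        simp only [hpre, Bool.false_eq_true, if_false]
        rw [ih t _ (by simpa using h)]
        simp [normA, hc]

theorem splitOn_go_splitA (fuel : Nat) (l cur : List Char) (acc : List (List Char))
    (h : l.length < fuel) :
    PySem.Chars.splitOn.go ['a'] fuel l cur acc
      = acc.reverse ++ (splitA l).modifyHead (cur.reverse ++ ·) := by
  induction fuel generalizing l cur acc with
  | zero => omega
  | succ n ih =>
    cases l with
    | nil => simp [PySem.Chars.splitOn.go, splitA]
    | cons c t =>
      simp only [PySem.Chars.splitOn.go]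
      by_cases hc : c = 'a'
      · subst hc
        have hpre : List.isPrefixOf ['a'] ('a' :: t) = true := by simp [List.isPrefixOf]
        simp only [hpre, if_true]
        rw [show List.drop (List.length ['a']) ('a' :: t) = t from rfl]
        rw [ih t [] _ (by simpa using h), modifyHead_id' _ (fun x => by simp)]
        simp [splitA]
      · have hpre : List.isPrefixOf ['a'] (c :: t) = false := by
          simp [List.isPrefixOf]
          exact fun hx => hc hx.symm
        simp only [hpre, Bool.false_eq_true, if_false]
        rw [ih t (c :: cur) _ (by simpa using h)]
        simp only [splitA, hc, if_false]
        rw [List.modifyHead_modifyHead]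
        refine congrArg (acc.reverse ++ ·) ?_
        refine modifyHead_ext _ _ (fun x => ?_) _
        simp

theorem splitOn_eq_splitA (l : List Char) :
    PySem.Chars.splitOn l ['a'] = splitA l := by
  unfold PySem.Chars.splitOn
  rw [splitOn_go_splitA (l.length + 1) l [] [] (by omega)]
  simp only [List.reverse_nil, List.nil_append]
  exact modifyHead_id' _ (fun x => rfl) _

theorem splitA_map_normA (cs : List Char) : splitA (cs.map normA) = splitAA cs := by
  induction cs with
  | nil => simp [splitA, splitAA]
  | cons c t ih =>
    by_cases h : c = 'a' ∨ c = 'A'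
    · have hn : normA c = 'a' := by rcases h with h | h <;> simp [normA, h]
      simp [splitA, splitAA, hn, h, ih]
    · have h1 : c ≠ 'a' := fun hx => h (Or.inl hx)
      have h2 : c ≠ 'A' := fun hx => h (Or.inr hx)
      have hn : normA c = c := by simp [normA, h2]
      simp [splitA, splitAA, hn, h1, h2, ih]

theorem splitAA_ne_nil (cs : List Char) : splitAA cs ≠ [] := by
  cases cs with
  | nil => simp [splitAA]
  | cons c t =>
    simp only [splitAA]
    split
    · simp
    · cases h : splitAA t with
      | nil => exact absurd h (splitAA_ne_nil t)
      | cons s r => simp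

theorem fA_eq_altJoin (cs : List Char) (p : Bool) :
    fA cs p = altJoin p (splitAA cs) := by
  induction cs generalizing p with
  | nil => cases p <;> simp [fA, splitAA, altJoin, PySem.Chars.upper]
  | cons c t ih =>
    by_cases h : c = 'a' ∨ c = 'A'
    · simp [fA, splitAA, h, altJoin, ih, PySem.Chars.upper]
    · obtain ⟨s, r, hsr⟩ : ∃ s r, splitAA t = s :: r := by
        cases hx : splitAA t with
        | nil => exact absurd hx (splitAA_ne_nil t)
        | cons s r => exact ⟨s, r, rfl⟩
      simp only [fA, h, if_false, splitAA, hsr, List.modifyHead, altJoin]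
      rw [ih p, hsr]
      cases p <;> simp [altJoin, PySem.Chars.upper]

theorem join_enum_altJoin (segs : List (List Char)) (i : Int) :
    PySem.Chars.join []
      ((PySem.List.enumerate segs i).map
        (fun ip => if ip.1 % 2 = 1 then PySem.Chars.upper ip.2 else ip.2))
      = altJoin (decide (i % 2 = 1)) segs := by
  induction segs generalizing i with
  | nil => simp [PySem.List.enumerate, PySem.Chars.join, List.intercalate, altJoin]
  | cons s r ih =>
    rw [PySem.List.enumerate_cons]
    simp only [List.map_cons]
    rw [joinNil_cons, ih (i + 1)]
    rcases Int.emod_two_eq_zero_or_one i with h | h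
    · have h1 : (i + 1) % 2 = 1 := by omega
      simp [altJoin, h, h1]
    · have h1 : (i + 1) % 2 = 0 := by omega
      simp [altJoin, h, h1]

theorem process_eq_process_alt (input : String) : process input = process_alt input := by
  unfold process process_alt
  refine congrArg String.ofList ?_
  rw [foldl_fA]
  have hrep : PySem.Chars.replace input.toList ['A'] ['a'] = input.toList.map normA := by
    unfold PySem.Chars.replace
    simp only [List.isEmpty_cons, Bool.false_eq_true, if_false]
    exact replace_go_norm _ _ _ (le_refl _)
  rw [hrep, splitOn_eq_splitA, splitA_map_normA, join_enum_altJoin]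
  rw [fA_eq_altJoin]
  norm_num

-- ===== VERDICT (by name: the statement is the Claim_ definition above) =====
theorem process_spec : Claim_equal_process := by
  intro input _
  unfold Spec_process
  exact process_eq_process_alt input
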